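-- pv_equiv track=rewrite | github.com/Vokimtuananh/Code-PTIT- | TÍCH CHỮ SỐ - TỔNG CHỮ SỐ.py | check
-- ===== SOURCE A (Python) =====
-- def check(s):
--     a = 1
--     b = 0
--     c = 0
--     for i in range(len(s)):
--         if i % 2 == 0:
--             if s[i] != '0':
--                 c = 1
--                 a *= int(s[i])
--         else: b += int(s[i])
--     if c == 0:
--         a = 0
--     return a, b
-- ===== SOURCE B (Python) =====
-- def check(s):
--     evens = [int(c) for c in s[::2] if c != '0']
--     b = sum(int(c) for c in s[1::2])
--     if not evens:
--         return 0, b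
--     a = 1
--     for d in evens:
--         a *= d
--     return a, b
-- ===== Notes on version B (the rewrite author's own statement) =====
-- stated objective: simpler
-- what changed: Replaces A's single index loop with an interleaved parity branch and a seen-nonzero flag by two strided slices: a filtered product over s[::2] (empty product means 0) and a plain sum over s[1::2].
import Mathlib
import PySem

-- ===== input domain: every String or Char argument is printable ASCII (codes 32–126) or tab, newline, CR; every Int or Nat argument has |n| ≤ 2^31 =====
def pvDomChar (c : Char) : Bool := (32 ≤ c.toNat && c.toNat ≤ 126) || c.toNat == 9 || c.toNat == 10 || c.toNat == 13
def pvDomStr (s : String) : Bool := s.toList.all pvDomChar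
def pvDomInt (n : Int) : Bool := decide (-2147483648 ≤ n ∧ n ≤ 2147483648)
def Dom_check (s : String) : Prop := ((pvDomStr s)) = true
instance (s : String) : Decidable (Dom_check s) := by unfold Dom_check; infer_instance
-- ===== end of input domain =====

-- B replaces A's fused index loop with a zero-flag by two strided slices (even-index product with a filter, odd-index sum); objective: simpler, no speed claim.

-- int(c) for a single character c, as both Pythons call it (exact where Python returns; Pre_ excludes non-digits, where Python raises ValueError)
def pyDigit (c : Char) : Int := (PySem.Int.ofChars? [c]).getD 0

-- ===== PORT A =====
def check (s : String) : Int × Int :=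
  let l := s.toList
  let st := (PySem.List.pyRange 0 (PySem.Str.len s) 1).foldl
    (fun (st : Int × Int × Int) i =>
      if PySem.Int.mod i 2 = 0 then
        if PySem.List.pyGetD l i ' ' ≠ '0' then
          (st.1 * pyDigit (PySem.List.pyGetD l i ' '), st.2.1, 1)
        else st
      else (st.1, st.2.1 + pyDigit (PySem.List.pyGetD l i ' '), st.2.2))
    ((1 : Int), (0 : Int), (0 : Int))
  let a := if st.2.2 = 0 then 0 else st.1
  (a, st.2.1)

-- ===== PORT B =====
-- s[::2] / s[1::2]: extended slicing with step 2 is not in PySem; everyOther is its exact hand port (every second element from the head)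
def everyOther {α : Type} : List α → List α
  | [] => []
  | [x] => [x]
  | x :: _ :: rest => x :: everyOther rest

def check_alt (s : String) : Int × Int :=
  let l := s.toList
  let evens := ((everyOther l).filter (fun c => c != '0')).map pyDigit
  let b := ((everyOther (l.drop 1)).map pyDigit).sum
  if evens.isEmpty then (0, b)
  else (evens.foldl (fun a d => a * d) 1, b)

-- ===== PRECONDITION & SPEC =====
-- Pre_: every character is an ASCII digit — on any other string A's int() raises ValueError (and B's does too).
def Pre_check (s : String) : Prop := (s.toList.all (fun c => 48 ≤ c.toNat && c.toNat ≤ 57)) = true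
instance (s : String) : Decidable (Pre_check s) := by unfold Pre_check; infer_instance
def pvWitness_check : String := "30142"

def Spec_check (s : String) (out : Int × Int) : Prop := out = check_alt s
instance (s : String) (out : Int × Int) : Decidable (Spec_check s out) := by unfold Spec_check; infer_instance

-- ===== CLAIM (what is proved, stated in full; the proofs are below) =====
def Claim_equal_check : Prop := ∀ (s : String), Dom_check s → Pre_check s → Spec_check s (check s)

-- ===== LEMMAS AND PROOFS =====

-- A's loop body over (index, element) pairs, as it acts after rewriting the range fold to an enumerate fold
def bodyA' (st : Int × Int × Int) (p : Int × Char) : Int × Int × Int :=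
  if PySem.Int.mod p.1 2 = 0 then
    if p.2 ≠ '0' then (st.1 * pyDigit p.2, st.2.1, 1) else st
  else (st.1, st.2.1 + pyDigit p.2, st.2.2)

lemma everyOther_cons {α : Type} (y : α) (rest : List α) :
    everyOther (y :: rest) = y :: everyOther (rest.drop 1) := by
  cases rest <;> simp [everyOther]

-- the invariant: from an even start index, A's enumerate-fold computes the even-index product fold,
-- the odd-index sum, and the flag records whether a non-'0' even-index character was seen
lemma loopA_split (l : List Char) : ∀ (k : Int), PySem.Int.mod k 2 = 0 → ∀ (a b c : Int),
    (PySem.List.enumerate l k).foldl bodyA' (a, b, c)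
      = (((everyOther l).filter (fun x => x != '0')).foldl (fun a x => a * pyDigit x) a,
         b + ((everyOther (l.drop 1)).map pyDigit).sum,
         if ((everyOther l).filter (fun x => x != '0')).isEmpty then c else 1) := by
  induction l using everyOther.induct with
  | case1 => intro k hk a b c; simp [everyOther]
  | case2 x =>
    intro k hk a b c
    have hk' : k % 2 = 0 := by
      rwa [PySem.Int.mod_eq_emod_of_pos (by norm_num)] at hk
    have hd0 : (2 : Int) ∣ k := by omega
    by_cases hx : x = '0' <;>
      simp [everyOther, PySem.List.enumerate_cons, bodyA', hd0, hx]
  | case3 x y rest ih =>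
    intro k hk a b c
    have hk' : k % 2 = 0 := by
      rwa [PySem.Int.mod_eq_emod_of_pos (by norm_num)] at hk
    have hd0 : (2 : Int) ∣ k := by omega
    have hd1 : ¬ (2 : Int) ∣ (k + 1) := by omega
    have h2 : PySem.Int.mod (k + 2) 2 = 0 := by
      rw [PySem.Int.mod_eq_emod_of_pos (by norm_num)]; omega
    by_cases hx : x = '0' <;>
      simp [PySem.List.enumerate_cons, bodyA', hd0, hd1, hx, everyOther, everyOther_cons,
            ih _ h2, add_assoc, show k + 1 + 1 = k + 2 from by ring]

-- ===== VERDICT (by name: the statement is the Claim_ definition above) =====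
theorem check_spec : Claim_equal_check := by
  intro s _ _
  unfold Spec_check check check_alt
  dsimp only
  have he : PySem.List.enumerate s.toList 0
      = (PySem.List.pyRange 0 (PySem.Str.len s) 1).map
          (fun j => (j, PySem.List.pyGetD s.toList j ' ')) := by
    simpa [PySem.Str.len_eq] using PySem.List.enumerate_eq_map_pyRange s.toList ' '
  have hfold : (PySem.List.pyRange 0 (PySem.Str.len s) 1).foldl
      (fun (st : Int × Int × Int) i =>
        if PySem.Int.mod i 2 = 0 then
          if PySem.List.pyGetD s.toList i ' ' ≠ '0' then
            (st.1 * pyDigit (PySem.List.pyGetD s.toList i ' '), st.2.1, (1 : Int))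
          else st
        else (st.1, st.2.1 + pyDigit (PySem.List.pyGetD s.toList i ' '), st.2.2))
      ((1 : Int), (0 : Int), (0 : Int))
      = (PySem.List.enumerate s.toList 0).foldl bodyA' (1, 0, 0) := by
    rw [he, List.foldl_map]; rfl
  rw [hfold, loopA_split s.toList 0 (by decide) 1 0 0]
  by_cases hemp : ((everyOther s.toList).filter (fun x => x != '0')).isEmpty <;>
    simp [hemp, List.foldl_map]
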